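-- pv_equiv track=rewrite | github.com/SModelS/protomodels | data/run.py | addAsterisk
-- ===== SOURCE A (Python) =====
-- def addAsterisk ( pattern ):
--     wcs =  [ "*", "?" ]
--     wcs += list(map(str,range(0,10)))
--     addAsterisk=True
--     for char in wcs:
--         if char in pattern:
--             addAsterisk=False
--     if addAsterisk:
--         pattern = pattern + "*"
--     return pattern
-- ===== SOURCE B (Python) =====
-- def addAsterisk(pattern):
--     has_special = any(c.isdigit() or c in "*?" for c in pattern)
--     return pattern if has_special else pattern + "*"
-- ===== Notes on version B (the rewrite author's own statement) =====
-- stated objective: idiomatic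
-- what changed: Instead of looping over the fixed 12-token wildcard/digit list and substring-testing each against the pattern, B makes a single short-circuiting pass over the pattern's characters with a per-character predicate (isdigit or in '*?').
import Mathlib
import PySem

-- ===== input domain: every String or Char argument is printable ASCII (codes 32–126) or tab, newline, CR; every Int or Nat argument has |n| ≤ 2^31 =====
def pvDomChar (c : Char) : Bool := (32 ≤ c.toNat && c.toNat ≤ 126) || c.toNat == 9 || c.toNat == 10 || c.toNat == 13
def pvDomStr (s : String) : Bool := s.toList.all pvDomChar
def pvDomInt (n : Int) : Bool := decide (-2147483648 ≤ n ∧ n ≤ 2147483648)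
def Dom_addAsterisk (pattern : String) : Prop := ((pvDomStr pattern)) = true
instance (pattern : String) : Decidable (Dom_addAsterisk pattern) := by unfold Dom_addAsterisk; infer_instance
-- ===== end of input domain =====

-- B replaces A's loop over the fixed 12-token wildcard/digit list (substring test each) by a
-- single pass over the pattern's characters with a per-character predicate (idiomatic).


-- ===== PORT A =====
def addAsterisk (pattern : String) : String :=
  let wcs : List String := ["*", "?"] ++ (PySem.List.pyRange 0 10 1).map PySem.Int.toStr
  let flag := wcs.foldl (fun b char => if PySem.Str.isIn char pattern then false else b) true
  if flag then pattern ++ "*" else pattern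

-- ===== PORT B =====
def addAsterisk_alt (pattern : String) : String :=
  let hasSpecial := pattern.toList.any
    (fun c => PySem.Chars.isdigit c || PySem.Str.isIn (String.singleton c) "*?")
  if hasSpecial then pattern else pattern ++ "*"

-- ===== PRECONDITION & SPEC =====
def Spec_addAsterisk (pattern : String) (out : String) : Prop := out = addAsterisk_alt pattern
instance (pattern : String) (out : String) : Decidable (Spec_addAsterisk pattern out) := by unfold Spec_addAsterisk; infer_instance

-- ===== CLAIM (what is proved, stated in full; the proofs are below) =====
def Claim_equal_addAsterisk : Prop := ∀ (pattern : String), Dom_addAsterisk pattern → Spec_addAsterisk pattern (addAsterisk pattern)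

-- ===== LEMMAS AND PROOFS =====

-- the 12 wildcard/digit characters of A's token list
def pvTokens : List Char := ['*', '?', '0', '1', '2', '3', '4', '5', '6', '7', '8', '9']

-- A's flag loop: the accumulator ends up false iff some token occurs in the pattern
theorem pv_foldl_flag (pattern : String) (ws : List String) (b : Bool) :
    ws.foldl (fun b char => if PySem.Str.isIn char pattern then false else b) b
      = (b && !(ws.any (fun w => PySem.Str.isIn w pattern))) := by
  induction ws generalizing b with
  | nil => simp
  | cons w ws ih =>
    simp only [List.foldl_cons, List.any_cons, ih]
    cases h : PySem.Str.isIn w pattern <;> simp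

-- 'c in s' for a one-character needle is character membership
theorem pv_isIn_singleton (c : Char) (s : String) :
    PySem.Str.isIn (String.singleton c) s = s.toList.contains c := by
  rw [Bool.eq_iff_iff]
  simp [String.singleton, PySem.Chars.isIn_iff_infix, List.singleton_infix_iff]

-- B's per-character predicate tests exactly membership in A's token set
theorem pv_pred_eq (c : Char) :
    (PySem.Chars.isdigit c || PySem.Str.isIn (String.singleton c) "*?") = pvTokens.contains c := by
  rw [Bool.eq_iff_iff]
  simp only [pv_isIn_singleton, PySem.Chars.isdigit]
  constructor
  · intro h
    rcases Bool.or_eq_true_iff.mp h with h | h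
    · have h1 : 48 ≤ c.toNat ∧ c.toNat ≤ 57 := by
        have := Bool.and_eq_true_iff.mp h
        exact ⟨Nat.le_of_lt_succ (Nat.lt_succ_of_le (of_decide_eq_true this.1)),
               of_decide_eq_true this.2⟩
      have hc : c.toNat = 48 ∨ c.toNat = 49 ∨ c.toNat = 50 ∨ c.toNat = 51 ∨ c.toNat = 52 ∨
          c.toNat = 53 ∨ c.toNat = 54 ∨ c.toNat = 55 ∨ c.toNat = 56 ∨ c.toNat = 57 := by omega
      simp only [pvTokens, List.contains_eq_mem, List.mem_cons, decide_eq_true_iff]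
      rcases hc with h|h|h|h|h|h|h|h|h|h <;>
        (rw [← Char.ofNat_toNat c, h]; decide)
    · rw [show "*?".toList = ['*', '?'] from rfl] at h
      simp only [pvTokens, List.contains_eq_mem, List.mem_cons, decide_eq_true_iff]
      simp only [List.contains_eq_mem, List.mem_cons, List.not_mem_nil, or_false,
        decide_eq_true_iff] at h
      tauto
  · intro h
    simp only [pvTokens, List.contains_eq_mem, decide_eq_true_iff, List.mem_cons,
      List.not_mem_nil, or_false] at h
    rcases h with h|h|h|h|h|h|h|h|h|h|h|h <;> subst h <;> decide

-- swap the iteration axis: any token occurring in l ↔ any element of l being a token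
theorem pv_any_swap (xs ys : List Char) :
    xs.any (fun x => ys.contains x) = ys.any (fun y => xs.contains y) := by
  rw [Bool.eq_iff_iff]
  simp only [List.any_eq_true, List.contains_eq_mem, decide_eq_true_iff]
  exact ⟨fun ⟨a, h1, h2⟩ => ⟨a, h2, h1⟩, fun ⟨a, h1, h2⟩ => ⟨a, h2, h1⟩⟩

-- ===== VERDICT (by name: the statement is the Claim_ definition above) =====
theorem addAsterisk_spec : Claim_equal_addAsterisk := by
  intro pattern _
  unfold Spec_addAsterisk addAsterisk addAsterisk_alt
  have hw : (["*", "?"] ++ (PySem.List.pyRange 0 10 1).map PySem.Int.toStr)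
      = pvTokens.map String.singleton := by decide
  simp only [hw, pv_foldl_flag, Bool.true_and, List.any_map, Function.comp_def]
  have h1 : (pvTokens.any (fun t => PySem.Str.isIn (String.singleton t) pattern))
      = pattern.toList.any (fun c => pvTokens.contains c) := by
    simp only [pv_isIn_singleton]
    exact pv_any_swap pvTokens pattern.toList
  have h2 : pattern.toList.any
      (fun c => PySem.Chars.isdigit c || PySem.Str.isIn (String.singleton c) "*?")
      = pattern.toList.any (fun c => pvTokens.contains c) := by
    simp only [pv_pred_eq]
  rw [h1, h2]
  cases h : pattern.toList.any (fun c => pvTokens.contains c) <;> simp
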